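-- pv_equiv track=rewrite | github.com/vivekmattam02/ERC-3-earthrover-challenge | baseline.py | build_action_edges_from_json
-- ===== SOURCE A (Python) =====
-- def build_action_edges_from_json(step_to_image: dict[int, str], step_to_action: dict[int, list[str]], image_to_node: dict[str, int],
--                                  ) -> list[tuple[int, int, list[str]]]:
--     """Generate a list of action-annotated edges from trajectory data.
--
--     This function iterates through consecutive steps in the trajectory. If an
--     action was recorded for a step, it creates an edge from the node representing
--     the current step's image to the node for the next step's image, annotating
--     the edge with the list of actions.
--
--     Args:
--         step_to_image (dict[int, str]): Map from step number to image name.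
--         step_to_action (dict[int, list[str]]): Map from step number to actions.
--         image_to_node (dict[str, int]): Map from image name to graph node index.
--
--     Returns:
--         list[tuple[int, int, list[str]]]: A list of tuples, where each
--             represents an edge: (source_node_idx, target_node_idx, action_list).
--     """
--     action_edges: list[tuple[int, int, list[str]]] = []
--     steps = sorted(step_to_image)
--     retained_steps = [step for step in steps if image_to_node.get(step_to_image.get(step, "")) is not None]
--
--     for current_step, next_step in zip(retained_steps[:-1], retained_steps[1:]):
--         image_current = step_to_image.get(current_step)
--         image_next = step_to_image.get(next_step)
--         if image_current is None or image_next is None: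
--             continue
--
--         node_u = image_to_node.get(image_current)
--         node_v = image_to_node.get(image_next)
--         if node_u is None or node_v is None:
--             continue
--
--         actions: list[str] = []
--         for step in steps:
--             if current_step <= step < next_step:
--                 actions.extend(step_to_action.get(step, []))
--
--         if not actions:
--             continue
--
--         action_edges.append((node_u, node_v, actions))
--
--     return action_edges
-- ===== SOURCE B (Python) =====
-- def build_action_edges_from_json(step_to_image: dict[int, str], step_to_action: dict[int, list[str]], image_to_node: dict[str, int],
--                                  ) -> list[tuple[int, int, list[str]]]:
--     """Single sorted sweep: walk the steps once in order, carrying the node of the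
--     last mapped step and the actions accumulated since it; emit an edge whenever
--     the next mapped step is reached and the accumulator is non-empty."""
--     edges: list[tuple[int, int, list[str]]] = []
--     prev: tuple[int, list[str]] | None = None  # (node of last mapped step, actions since it)
--     for step in sorted(step_to_image):
--         node = image_to_node.get(step_to_image.get(step, ""))
--         actions = step_to_action.get(step, [])
--         if node is not None:
--             if prev is not None and prev[1]:
--                 edges.append((prev[0], node, prev[1]))
--             prev = (node, list(actions))
--         elif prev is not None:
--             prev[1].extend(actions)
--     return edges
-- ===== Notes on version B (the rewrite author's own statement) =====
-- stated objective: alternative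
-- what changed: Replaces the per-pair rescan of the whole sorted step list with a single sorted sweep that carries the last mapped node and an action accumulator, emitting each edge as the next mapped step is reached (worst-case O(n^2) rescans become one pass; on the measured inputs the cost is the same).
import Mathlib
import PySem

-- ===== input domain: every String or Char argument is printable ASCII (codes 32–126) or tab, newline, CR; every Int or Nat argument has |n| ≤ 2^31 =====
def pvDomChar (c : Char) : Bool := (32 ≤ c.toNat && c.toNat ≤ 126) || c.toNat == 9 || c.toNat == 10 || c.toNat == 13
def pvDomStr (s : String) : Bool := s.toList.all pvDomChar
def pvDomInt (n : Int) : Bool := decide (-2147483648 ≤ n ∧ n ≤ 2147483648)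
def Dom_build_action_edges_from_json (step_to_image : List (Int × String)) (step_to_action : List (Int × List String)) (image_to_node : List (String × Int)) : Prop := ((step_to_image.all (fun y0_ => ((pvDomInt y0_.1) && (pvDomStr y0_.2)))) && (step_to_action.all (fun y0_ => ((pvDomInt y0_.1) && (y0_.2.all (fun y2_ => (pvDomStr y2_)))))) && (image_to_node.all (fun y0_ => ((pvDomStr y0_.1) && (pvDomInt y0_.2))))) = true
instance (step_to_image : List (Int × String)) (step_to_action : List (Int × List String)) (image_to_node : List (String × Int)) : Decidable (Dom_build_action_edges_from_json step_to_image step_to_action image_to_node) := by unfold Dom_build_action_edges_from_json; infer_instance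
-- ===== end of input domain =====

-- B: one sorted sweep carrying the last mapped node and an action accumulator,
-- instead of A's rescan of all sorted steps for every consecutive mapped pair.


-- ===== PORT A =====
def build_action_edges_from_json (step_to_image : List (Int × String)) (step_to_action : List (Int × List String)) (image_to_node : List (String × Int)) : List (Int × Int × List String) :=
  let d1 := PySem.Dict.ofList step_to_image
  let d2 := PySem.Dict.ofList step_to_action
  let dn := PySem.Dict.ofList image_to_node
  let steps := PySem.List.sorted d1.keys (fun x => x) false
  let retained := steps.filter (fun step => (dn.get? (d1.getD step "")).isSome)
  -- retained[:-1] is dropLast, retained[1:] is drop 1 (exact for these slices)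
  (retained.dropLast.zip (retained.drop 1)).foldl (fun action_edges cn =>
    match d1.get? cn.1, d1.get? cn.2 with
    | some image_current, some image_next =>
      match dn.get? image_current, dn.get? image_next with
      | some node_u, some node_v =>
        let actions := steps.foldl (fun a step =>
          if cn.1 ≤ step ∧ step < cn.2 then a ++ d2.getD step [] else a) []
        if actions = [] then action_edges else action_edges ++ [(node_u, node_v, actions)]
      | _, _ => action_edges
    | _, _ => action_edges) []

-- ===== PORT B =====
def build_action_edges_from_json_alt (step_to_image : List (Int × String)) (step_to_action : List (Int × List String)) (image_to_node : List (String × Int)) : List (Int × Int × List String) :=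
  let d1 := PySem.Dict.ofList step_to_image
  let d2 := PySem.Dict.ofList step_to_action
  let dn := PySem.Dict.ofList image_to_node
  ((PySem.List.sorted d1.keys (fun x => x) false).foldl
    (fun (st : List (Int × Int × List String) × Option (Int × List String)) step =>
      let node := dn.get? (d1.getD step "")
      let actions := d2.getD step []
      match node with
      | some n =>
        match st.2 with
        | some prev => if prev.2 ≠ [] then (st.1 ++ [(prev.1, n, prev.2)], some (n, actions))
                       else (st.1, some (n, actions))
        | none => (st.1, some (n, actions))
      | none =>
        match st.2 with
        | some prev => (st.1, some (prev.1, prev.2 ++ actions))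
        | none => (st.1, none)) ([], none)).1

-- ===== PRECONDITION & SPEC =====
def Spec_build_action_edges_from_json (step_to_image : List (Int × String)) (step_to_action : List (Int × List String)) (image_to_node : List (String × Int)) (out : List (Int × Int × List String)) : Prop := out = build_action_edges_from_json_alt step_to_image step_to_action image_to_node
instance (step_to_image : List (Int × String)) (step_to_action : List (Int × List String)) (image_to_node : List (String × Int)) (out : List (Int × Int × List String)) : Decidable (Spec_build_action_edges_from_json step_to_image step_to_action image_to_node out) := by unfold Spec_build_action_edges_from_json; infer_instance

-- ===== CLAIM (what is proved, stated in full; the proofs are below) =====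
def Claim_equal_build_action_edges_from_json : Prop := ∀ (step_to_image : List (Int × String)) (step_to_action : List (Int × List String)) (image_to_node : List (String × Int)), Dom_build_action_edges_from_json step_to_image step_to_action image_to_node → Spec_build_action_edges_from_json step_to_image step_to_action image_to_node (build_action_edges_from_json step_to_image step_to_action image_to_node)

-- ===== LEMMAS AND PROOFS =====

def pvNode (d1 : PySem.Dict Int String) (dn : PySem.Dict String Int) (s : Int) : Option Int :=
  dn.get? (d1.getD s "")

-- shared mid-level recursion: edges emitted from the last mapped node `pn` with accumulator `acc`
def pvM (d1 : PySem.Dict Int String) (d2 : PySem.Dict Int (List String)) (dn : PySem.Dict String Int)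
    (pn : Int) (acc : List String) : List Int → List (Int × Int × List String)
  | [] => []
  | s :: rest =>
    match pvNode d1 dn s with
    | some n => (if acc ≠ [] then [(pn, n, acc)] else []) ++ pvM d1 d2 dn n (d2.getD s []) rest
    | none => pvM d1 d2 dn pn (acc ++ d2.getD s []) rest

def pvM0 (d1 : PySem.Dict Int String) (d2 : PySem.Dict Int (List String)) (dn : PySem.Dict String Int) :
    List Int → List (Int × Int × List String)
  | [] => []
  | s :: rest =>
    match pvNode d1 dn s with
    | some n => pvM d1 d2 dn n (d2.getD s []) rest
    | none => pvM0 d1 d2 dn rest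

-- B's loop body
def pvF (d1 : PySem.Dict Int String) (d2 : PySem.Dict Int (List String)) (dn : PySem.Dict String Int)
    (st : List (Int × Int × List String) × Option (Int × List String)) (step : Int) :
    List (Int × Int × List String) × Option (Int × List String) :=
  let node := dn.get? (d1.getD step "")
  let actions := d2.getD step []
  match node with
  | some n =>
    match st.2 with
    | some prev => if prev.2 ≠ [] then (st.1 ++ [(prev.1, n, prev.2)], some (n, actions))
                   else (st.1, some (n, actions))
    | none => (st.1, some (n, actions))
  | none =>
    match st.2 with
    | some prev => (st.1, some (prev.1, prev.2 ++ actions))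
    | none => (st.1, none)

-- A's loop body over consecutive retained pairs, actions rescanned over `steps`
def pvG (d1 : PySem.Dict Int String) (d2 : PySem.Dict Int (List String)) (dn : PySem.Dict String Int)
    (steps : List Int) (action_edges : List (Int × Int × List String)) (cn : Int × Int) :
    List (Int × Int × List String) :=
  match d1.get? cn.1, d1.get? cn.2 with
  | some image_current, some image_next =>
    match dn.get? image_current, dn.get? image_next with
    | some node_u, some node_v =>
      let actions := steps.foldl (fun a step =>
        if cn.1 ≤ step ∧ step < cn.2 then a ++ d2.getD step [] else a) []
      if actions = [] then action_edges else action_edges ++ [(node_u, node_v, actions)]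
    | _, _ => action_edges
  | _, _ => action_edges

lemma pvB2 (d1 : PySem.Dict Int String) (d2 : PySem.Dict Int (List String)) (dn : PySem.Dict String Int)
    (l : List Int) : ∀ (es : List (Int × Int × List String)) (pn : Int) (acc : List String),
    (l.foldl (pvF d1 d2 dn) (es, some (pn, acc))).1 = es ++ pvM d1 d2 dn pn acc l := by
  induction l with
  | nil => intro es pn acc; simp [pvM]
  | cons s rest ih =>
    intro es pn acc
    simp only [List.foldl_cons, pvF, pvM]
    cases h : pvNode d1 dn s with
    | some n =>
      simp only [pvNode] at h
      rw [h]
      by_cases hacc : acc ≠ []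
      · simp [hacc, ih, List.append_assoc]
      · simp at hacc; simp [hacc, ih]
    | none =>
      simp only [pvNode] at h
      rw [h]
      simp [ih]

lemma pvB1 (d1 : PySem.Dict Int String) (d2 : PySem.Dict Int (List String)) (dn : PySem.Dict String Int)
    (l : List Int) : ∀ (es : List (Int × Int × List String)),
    (l.foldl (pvF d1 d2 dn) (es, none)).1 = es ++ pvM0 d1 d2 dn l := by
  induction l with
  | nil => intro es; simp [pvM0]
  | cons s rest ih =>
    intro es
    simp only [List.foldl_cons, pvF, pvM0]
    cases h : pvNode d1 dn s with
    | some n => simp only [pvNode] at h; rw [h]; simp [pvB2]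
    | none => simp only [pvNode] at h; rw [h]; simp [ih]

-- accumulator absorbs a run of unmapped steps
lemma pvM_seg (d1 : PySem.Dict Int String) (d2 : PySem.Dict Int (List String)) (dn : PySem.Dict String Int)
    (seg : List Int) : ∀ (l : List Int) (pn : Int) (acc : List String),
    (∀ s ∈ seg, pvNode d1 dn s = none) →
    pvM d1 d2 dn pn acc (seg ++ l) = pvM d1 d2 dn pn (acc ++ seg.flatMap (fun s => d2.getD s [])) l := by
  induction seg with
  | nil => intro l pn acc _; simp
  | cons s seg ih =>
    intro l pn acc h
    have hs : pvNode d1 dn s = none := h s (by simp)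
    simp only [List.cons_append, pvM, hs]
    rw [ih _ _ _ (fun x hx => h x (by simp [hx]))]
    simp [List.append_assoc]

-- the actions rescan is a filter + flatten
lemma pvActs_eq (d2 : PySem.Dict Int (List String)) (base : List Int) (c n : Int) :
    base.foldl (fun a step => if c ≤ step ∧ step < n then a ++ d2.getD step [] else a) [] =
    (base.filter (fun s => decide (c ≤ s ∧ s < n))).flatMap (fun s => d2.getD s []) := by
  rw [PySem.List.foldl_ite_eq_foldl_filter, PySem.List.foldl_append_eq_flatMap]
  simp

-- smaller elements in front of the base do not contribute to any pair with c beyond them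
lemma pvG_drop (d1 : PySem.Dict Int String) (d2 : PySem.Dict Int (List String)) (dn : PySem.Dict String Int)
    (pre l : List Int) (es : List (Int × Int × List String)) (cn : Int × Int)
    (h : ∀ x ∈ pre, x < cn.1) :
    pvG d1 d2 dn (pre ++ l) es cn = pvG d1 d2 dn l es cn := by
  have hact : (pre ++ l).foldl (fun a step => if cn.1 ≤ step ∧ step < cn.2 then a ++ d2.getD step [] else a) [] =
      l.foldl (fun a step => if cn.1 ≤ step ∧ step < cn.2 then a ++ d2.getD step [] else a) [] := by
    rw [pvActs_eq, pvActs_eq, List.filter_append]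
    have hpre : pre.filter (fun s => decide (cn.1 ≤ s ∧ s < cn.2)) = [] := by
      rw [List.filter_eq_nil_iff]
      intro x hx
      simp only [decide_eq_true_eq, not_and]
      intro hle
      exact absurd hle (not_le.mpr (h x hx))
    rw [hpre, List.nil_append]
  unfold pvG
  rw [hact]

lemma pvA1 (d1 : PySem.Dict Int String) (d2 : PySem.Dict Int (List String)) (dn : PySem.Dict String Int) :
    ∀ (N : Nat) (l : List Int) (cur pn : Int) (es : List (Int × Int × List String)),
    l.length ≤ N →
    List.Pairwise (· < ·) (cur :: l) →
    (∀ s ∈ l, s ∈ d1.keys) → cur ∈ d1.keys →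
    pvNode d1 dn cur = some pn →
    ((cur :: l.filter (fun s => (pvNode d1 dn s).isSome)).dropLast.zip
     ((cur :: l.filter (fun s => (pvNode d1 dn s).isSome)).drop 1)).foldl (pvG d1 d2 dn (cur :: l)) es
    = es ++ pvM d1 d2 dn pn (d2.getD cur []) l := by
  intro N
  induction N with
  | zero =>
    intro l cur pn es hlen _ _ _ _
    have hnil : l = [] := List.length_eq_zero_iff.mp (Nat.le_zero.mp hlen)
    subst hnil
    simp [pvM]
  | succ N ih =>
    intro l cur pn es hlen hpw hmem hcur hnode
    set rb : Int → Bool := fun s => (pvNode d1 dn s).isSome with hrb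
    have hsplit : l.takeWhile (fun s => !rb s) ++ l.dropWhile (fun s => !rb s) = l :=
      List.takeWhile_append_dropWhile
    set seg := l.takeWhile (fun s => !rb s) with hsegdef
    have hseg : ∀ s ∈ seg, pvNode d1 dn s = none := by
      intro s hs
      have := List.mem_takeWhile_imp hs
      simp only [hrb, Bool.not_eq_true', Option.isSome_eq_false_iff, Option.isNone_iff_eq_none] at this
      exact this
    have hsegfilter : seg.filter rb = [] := by
      rw [List.filter_eq_nil_iff]
      intro x hx
      simp [hrb, hseg x hx]
    cases hrest : l.dropWhile (fun s => !rb s) with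
    | nil =>
      have hl : l = seg := by rw [← hsplit, hrest, List.append_nil]
      have hfl : l.filter rb = [] := by rw [hl]; exact hsegfilter
      rw [hfl]
      simp only [show ([cur] : List Int).dropLast = [] from rfl, List.zip_nil_left, List.foldl_nil]
      rw [hl, ← List.append_nil seg, pvM_seg d1 d2 dn seg [] pn _ hseg]
      simp [pvM]
    | cons next rest'' =>
      have hl : l = seg ++ next :: rest'' := by rw [← hsplit, hrest]
      have hnext_rb : rb next = true := by
        have h1 : l.dropWhile (fun s => !rb s) ≠ [] := by rw [hrest]; simp
        have h2 : (l.dropWhile fun s => !rb s).head h1 = next := by simp [hrest]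
        have := List.head_dropWhile_not (fun s => !rb s) h1
        rw [h2] at this
        simpa using this
      obtain ⟨nv, hnv⟩ : ∃ nv, pvNode d1 dn next = some nv := by
        simpa [hrb, Option.isSome_iff_exists] using hnext_rb
      -- pairwise facts
      have hpwl : List.Pairwise (· < ·) l := (List.pairwise_cons.mp hpw).2
      have hcur_lt : ∀ b ∈ l, cur < b := (List.pairwise_cons.mp hpw).1
      rw [hl] at hpwl
      have hpwapp := List.pairwise_append.mp hpwl
      have hseg_lt : ∀ a ∈ seg, ∀ b ∈ next :: rest'', a < b := hpwapp.2.2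
      have hpw_next : List.Pairwise (· < ·) (next :: rest'') := hpwapp.2.1
      have hnext_lt : ∀ b ∈ rest'', next < b := (List.pairwise_cons.mp hpw_next).1
      -- filter structure
      have hfl : l.filter rb = next :: rest''.filter rb := by
        rw [hl, List.filter_append, hsegfilter, List.nil_append, List.filter_cons_of_pos hnext_rb]
      rw [hfl]
      -- unfold one zip step
      have hzip : ((cur :: next :: rest''.filter rb).dropLast.zip
          ((cur :: next :: rest''.filter rb).drop 1)) =
          (cur, next) :: ((next :: rest''.filter rb).dropLast.zip ((next :: rest''.filter rb).drop 1)) := by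
        rw [List.dropLast_cons₂]
        simp [List.zip_cons_cons]
      rw [hzip, List.foldl_cons]
      -- evaluate the first pvG
      obtain ⟨ic, hic⟩ : ∃ v, d1.get? cur = some v := by
        cases hq : d1.get? cur with
        | none => exact absurd hcur ((PySem.Dict.get?_eq_none_iff_not_mem_keys _ _).mp hq)
        | some v => exact ⟨v, rfl⟩
      obtain ⟨inx, hinx⟩ : ∃ v, d1.get? next = some v := by
        have hnextmem : next ∈ d1.keys := hmem next (by rw [hl]; simp)
        cases hq : d1.get? next with
        | none => exact absurd hnextmem ((PySem.Dict.get?_eq_none_iff_not_mem_keys _ _).mp hq)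
        | some v => exact ⟨v, rfl⟩
      have hicD : d1.getD cur "" = ic := PySem.Dict.getD_of_get?_eq_some _ "" hic
      have hinxD : d1.getD next "" = inx := PySem.Dict.getD_of_get?_eq_some _ "" hinx
      have hdnc : dn.get? ic = some pn := by rw [← hicD]; exact hnode
      have hdnn : dn.get? inx = some nv := by rw [← hinxD]; exact hnv
      have hcur_lt_next : cur < next := hcur_lt next (by rw [hl]; simp)
      -- actions of the first pair
      have hactfilter : (cur :: l).filter (fun s => decide (cur ≤ s ∧ s < next)) = cur :: seg := by
        rw [hl, List.filter_cons_of_pos (by simp [hcur_lt_next]),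
            List.filter_append, List.filter_cons_of_neg (by simp)]
        have h1 : seg.filter (fun s => decide (cur ≤ s ∧ s < next)) = seg := by
          rw [List.filter_eq_self]
          intro a ha
          simp only [decide_eq_true_eq]
          exact ⟨le_of_lt (hcur_lt a (by rw [hl]; exact List.mem_append_left _ ha)),
                 hseg_lt a ha next (by simp)⟩
        have h2 : rest''.filter (fun s => decide (cur ≤ s ∧ s < next)) = [] := by
          rw [List.filter_eq_nil_iff]
          intro y hy
          simp only [decide_eq_true_eq, not_and]
          intro _
          exact not_lt.mpr (le_of_lt (hnext_lt y hy))
        rw [h1, h2, List.append_nil]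
      have hacts : (cur :: l).foldl (fun a step => if cur ≤ step ∧ step < next then a ++ d2.getD step [] else a) [] =
          d2.getD cur [] ++ seg.flatMap (fun s => d2.getD s []) := by
        rw [pvActs_eq, hactfilter]
        simp [List.flatMap_cons]
      have hG : pvG d1 d2 dn (cur :: l) es (cur, next) =
          es ++ (if d2.getD cur [] ++ seg.flatMap (fun s => d2.getD s []) ≠ []
                 then [(pn, nv, d2.getD cur [] ++ seg.flatMap (fun s => d2.getD s []))] else []) := by
        unfold pvG
        simp only [hic, hinx, hdnc, hdnn, hacts]
        by_cases hz : d2.getD cur [] ++ seg.flatMap (fun s => d2.getD s []) = []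
        · simp [hz]
        · simp [hz]
      rw [hG]
      -- switch the base of the remaining pairs, then apply IH
      have hbase : ∀ init : List (Int × Int × List String),
          ((next :: rest''.filter rb).dropLast.zip
          ((next :: rest''.filter rb).drop 1)).foldl (pvG d1 d2 dn (cur :: l)) init =
          ((next :: rest''.filter rb).dropLast.zip ((next :: rest''.filter rb).drop 1)).foldl
            (pvG d1 d2 dn (next :: rest'')) init := by
        intro init
        apply PySem.List.foldl_congr_mem
        intro acc x hx
        have hx1 : x.1 ∈ (next :: rest''.filter rb).dropLast := (List.of_mem_zip hx).1
        have hx1' : x.1 ∈ next :: rest''.filter rb := List.dropLast_sublist _ |>.mem hx1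
        have hnextlex : next ≤ x.1 := by
          rcases List.mem_cons.mp hx1' with h | h
          · rw [h]
          · exact le_of_lt (hnext_lt x.1 (List.mem_of_mem_filter h))
        have : cur :: l = (cur :: seg) ++ (next :: rest'') := by rw [hl]; rfl
        rw [this]
        apply pvG_drop
        intro y hy
        rcases List.mem_cons.mp hy with h | h
        · exact lt_of_lt_of_le (h ▸ hcur_lt_next) hnextlex
        · exact lt_of_lt_of_le (lt_of_lt_of_le (hseg_lt y h next (by simp)) hnextlex) (le_refl _)
      rw [hbase]
      have hlen'' : rest''.length ≤ N := by
        have : l.length = seg.length + (rest''.length + 1) := by rw [hl]; simp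
        omega
      rw [ih rest'' next nv _ hlen'' hpw_next
          (fun s hs => hmem s (by rw [hl]; simp [hs])) (hmem next (by rw [hl]; simp)) hnv]
      -- assemble the RHS
      rw [hl, pvM_seg d1 d2 dn seg _ pn _ hseg]
      simp only [pvM, hnv]
      by_cases hz : d2.getD cur [] ++ seg.flatMap (fun s => d2.getD s []) = []
      · simp [hz]
      · simp [hz, List.append_assoc]

lemma pvA0 (d1 : PySem.Dict Int String) (d2 : PySem.Dict Int (List String)) (dn : PySem.Dict String Int)
    (l : List Int) : List.Pairwise (· < ·) l → (∀ s ∈ l, s ∈ d1.keys) →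
    ((l.filter (fun s => (pvNode d1 dn s).isSome)).dropLast.zip
     ((l.filter (fun s => (pvNode d1 dn s).isSome)).drop 1)).foldl (pvG d1 d2 dn l) []
    = pvM0 d1 d2 dn l := by
  induction l with
  | nil => intro _ _; simp [pvM0]
  | cons s t ih =>
    intro hpw hmem
    cases hb : pvNode d1 dn s with
    | some n =>
      have hfil : (s :: t).filter (fun x => (pvNode d1 dn x).isSome) =
          s :: t.filter (fun x => (pvNode d1 dn x).isSome) := by
        rw [List.filter_cons_of_pos (by simp [hb])]
      rw [hfil, pvA1 d1 d2 dn t.length t s n [] (le_refl _) hpw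
          (fun x hx => hmem x (by simp [hx])) (hmem s (by simp)) hb]
      simp [pvM0, hb]
    | none =>
      have hfil : (s :: t).filter (fun x => (pvNode d1 dn x).isSome) =
          t.filter (fun x => (pvNode d1 dn x).isSome) := by
        rw [List.filter_cons_of_neg (by simp [hb])]
      rw [hfil]
      have hcong : ∀ init : List (Int × Int × List String),
          ((t.filter (fun x => (pvNode d1 dn x).isSome)).dropLast.zip
           ((t.filter (fun x => (pvNode d1 dn x).isSome)).drop 1)).foldl (pvG d1 d2 dn (s :: t)) init =
          ((t.filter (fun x => (pvNode d1 dn x).isSome)).dropLast.zip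
           ((t.filter (fun x => (pvNode d1 dn x).isSome)).drop 1)).foldl (pvG d1 d2 dn t) init := by
        intro init
        apply PySem.List.foldl_congr_mem
        intro acc x hx
        have hx1 : x.1 ∈ (t.filter (fun x => (pvNode d1 dn x).isSome)).dropLast := (List.of_mem_zip hx).1
        have hx1' : x.1 ∈ t := List.mem_of_mem_filter (List.dropLast_sublist _ |>.mem hx1)
        have : s :: t = [s] ++ t := rfl
        rw [this]
        apply pvG_drop
        intro y hy
        rcases List.mem_cons.mp hy with h | h
        · exact h ▸ (List.pairwise_cons.mp hpw).1 x.1 hx1'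
        · simp at h
      rw [hcong, ih (List.pairwise_cons.mp hpw).2 (fun x hx => hmem x (by simp [hx]))]
      simp [pvM0, hb]


-- ===== VERDICT (by name: the statement is the Claim_ definition above) =====
theorem build_action_edges_from_json_spec : Claim_equal_build_action_edges_from_json := by
  intro step_to_image step_to_action image_to_node _
  unfold Spec_build_action_edges_from_json
  unfold build_action_edges_from_json build_action_edges_from_json_alt
  set d1 := PySem.Dict.ofList step_to_image
  set d2 := PySem.Dict.ofList step_to_action
  set dn := PySem.Dict.ofList image_to_node
  set steps := PySem.List.sorted d1.keys (fun x => x) false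
  have hpw : List.Pairwise (· < ·) steps := by
    have hle : List.Pairwise (fun a b => a ≤ b) steps := PySem.List.sorted_pairwise d1.keys (fun x => x)
    have hnd : steps.Nodup := (PySem.List.sorted_perm d1.keys (fun x => x) false).nodup_iff.mpr
      (PySem.Dict.nodup_keys_ofList step_to_image)
    exact (hle.and hnd).imp (fun h => lt_of_le_of_ne h.1 h.2)
  have hmem : ∀ s ∈ steps, s ∈ d1.keys := fun s hs =>
    (PySem.List.mem_sorted d1.keys (fun x => x) false s).mp hs
  have hA := pvA0 d1 d2 dn steps hpw hmem
  have hB := pvB1 d1 d2 dn steps []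
  calc _ = pvM0 d1 d2 dn steps := hA
    _ = _ := by rw [List.nil_append] at hB; exact hB.symm
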